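-- pv_equiv track=rewrite | github.com/jsmy-CTH/Botfip | Botfip/operation/tree_encode.py | splitseq_to_treeseq
-- ===== SOURCE A (Python) =====
-- def splitseq_to_treeseq(tree_without_end_flag,node_index):
--     current_count_ind = 0
--     tree_seq = []
--     for i in range(len(tree_without_end_flag)):
--         if tree_without_end_flag[i] == 1:
--             tree_seq.append(node_index[current_count_ind]+1)
--             current_count_ind += 1
--         else:
--             tree_seq.append(0)
--     return tree_seq
-- ===== SOURCE B (Python) =====
-- def splitseq_to_treeseq(tree_without_end_flag, node_index):
--     # two-pass: prefix counts of 1-flags, then a comprehension indexing through them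
--     cum = []
--     c = 0
--     for f in tree_without_end_flag:
--         c += (f == 1)
--         cum.append(c)
--     return [node_index[cum[i] - 1] + 1 if tree_without_end_flag[i] == 1 else 0
--             for i in range(len(tree_without_end_flag))]
-- ===== Notes on version B (the rewrite author's own statement) =====
-- stated objective: alternative
-- what changed: Replaces A's single pass with an inline running counter by a two-pass decomposition: first build a prefix-count table of 1-flags, then a comprehension that produces each output position by indexing node_index through that table.
import Mathlib
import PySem

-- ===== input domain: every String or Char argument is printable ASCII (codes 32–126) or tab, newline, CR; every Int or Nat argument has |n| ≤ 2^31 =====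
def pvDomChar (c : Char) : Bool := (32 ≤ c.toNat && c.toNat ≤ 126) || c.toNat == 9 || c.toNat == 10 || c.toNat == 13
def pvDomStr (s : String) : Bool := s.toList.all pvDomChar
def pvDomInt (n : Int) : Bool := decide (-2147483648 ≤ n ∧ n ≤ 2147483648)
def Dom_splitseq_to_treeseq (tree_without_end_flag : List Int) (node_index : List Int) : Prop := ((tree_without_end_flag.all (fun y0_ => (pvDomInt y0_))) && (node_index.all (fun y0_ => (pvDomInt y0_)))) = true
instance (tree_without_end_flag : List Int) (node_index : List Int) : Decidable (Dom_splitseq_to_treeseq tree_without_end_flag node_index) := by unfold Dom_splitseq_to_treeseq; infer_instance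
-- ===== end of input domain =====

-- B replaces A's inline running counter by a two-pass decomposition (prefix-count
-- table, then a comprehension indexing node_index through it); same cost, objective: alternative.

-- ===== PORT A =====
-- single pass over range(len(...)), state = (current_count_ind, tree_seq)
def splitseq_to_treeseq (tree_without_end_flag : List Int) (node_index : List Int) : List Int :=
  ((PySem.List.pyRange 0 (tree_without_end_flag.length : Int) 1).foldl
    (fun (st : Int × List Int) i =>
      if PySem.List.pyGetD tree_without_end_flag i 0 == 1 then
        (st.1 + 1, st.2 ++ [PySem.List.pyGetD node_index st.1 0 + 1])
      else
        (st.1, st.2 ++ [0])) ((0 : Int), ([] : List Int))).2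

-- ===== PORT B =====
-- first pass of Source B: the running prefix count of 1-flags
def pvCumFlags (tree_without_end_flag : List Int) : List Int :=
  ((tree_without_end_flag.foldl
    (fun (st : Int × List Int) f =>
      (st.1 + (if f == 1 then 1 else 0), st.2 ++ [st.1 + (if f == 1 then 1 else 0)]))
    ((0 : Int), ([] : List Int)))).2

def splitseq_to_treeseq_alt (tree_without_end_flag : List Int) (node_index : List Int) : List Int :=
  let cum := pvCumFlags tree_without_end_flag
  (PySem.List.pyRange 0 (tree_without_end_flag.length : Int) 1).map (fun i =>
    if PySem.List.pyGetD tree_without_end_flag i 0 == 1 then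
      PySem.List.pyGetD node_index (PySem.List.pyGetD cum i 0 - 1) 0 + 1
    else 0)

-- ===== PRECONDITION & SPEC =====
-- Pre_: the Python raises IndexError when there are more 1-flags than node indices
def Pre_splitseq_to_treeseq (tree_without_end_flag : List Int) (node_index : List Int) : Prop :=
  tree_without_end_flag.countP (fun f => f == 1) ≤ node_index.length
instance (tree_without_end_flag : List Int) (node_index : List Int) : Decidable (Pre_splitseq_to_treeseq tree_without_end_flag node_index) := by unfold Pre_splitseq_to_treeseq; infer_instance
def pvWitness_splitseq_to_treeseq : List Int × List Int := ([1, 0, 1, 2, 1], [4, 7, 9])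

def Spec_splitseq_to_treeseq (tree_without_end_flag : List Int) (node_index : List Int) (out : List Int) : Prop := out = splitseq_to_treeseq_alt tree_without_end_flag node_index
instance (tree_without_end_flag : List Int) (node_index : List Int) (out : List Int) : Decidable (Spec_splitseq_to_treeseq tree_without_end_flag node_index out) := by unfold Spec_splitseq_to_treeseq; infer_instance

-- ===== CLAIM (what is proved, stated in full; the proofs are below) =====
def Claim_equal_splitseq_to_treeseq : Prop := ∀ (tree_without_end_flag : List Int) (node_index : List Int), Dom_splitseq_to_treeseq tree_without_end_flag node_index → Pre_splitseq_to_treeseq tree_without_end_flag node_index → Spec_splitseq_to_treeseq tree_without_end_flag node_index (splitseq_to_treeseq tree_without_end_flag node_index)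

-- ===== LEMMAS AND PROOFS =====

-- reference form: A's loop as a structural recursion carrying the running counter
def pvGo (ni : List Int) : List Int → Int → List Int
  | [], _ => []
  | f :: rest, c =>
      if f == 1 then (PySem.List.pyGetD ni c 0 + 1) :: pvGo ni rest (c + 1)
      else (0 : Int) :: pvGo ni rest c

theorem pvGo_length (ni t : List Int) (c : Int) : (pvGo ni t c).length = t.length := by
  induction t generalizing c with
  | nil => rfl
  | cons f rest ih => simp only [pvGo]; split_ifs <;> simp [ih]

theorem pvGo_getElem (ni t : List Int) (c : Int) (k : Nat) (hk : k < t.length) :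
    (pvGo ni t c)[k]'(by rw [pvGo_length]; exact hk) =
      if t[k] == 1 then
        PySem.List.pyGetD ni (c + ((t.take k).countP (fun f => f == 1) : Int)) 0 + 1
      else 0 := by
  induction t generalizing c k with
  | nil => simp at hk
  | cons f rest ih =>
    cases k with
    | zero => simp only [pvGo]; split_ifs with h <;> simp [h]
    | succ k =>
      simp only [pvGo]
      have hk' : k < rest.length := by simpa using hk
      split_ifs with h
      · simp only [List.getElem_cons_succ, List.take_succ_cons, List.countP_cons, ih _ _ hk', h]
        have : c + 1 + ((rest.take k).countP (fun f => f == 1) : Int)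
             = c + (((rest.take k).countP (fun f => f == 1) + 1 : Nat) : Int) := by push_cast; ring
        simp [this]
      · simp only [List.getElem_cons_succ, List.take_succ_cons, List.countP_cons, ih _ _ hk', h]
        simp [h]

theorem portA_inv (ni t : List Int) (c : Int) (acc : List Int) :
    (t.foldl (fun (st : Int × List Int) f =>
        if f == 1 then (st.1 + 1, st.2 ++ [PySem.List.pyGetD ni st.1 0 + 1])
        else (st.1, st.2 ++ [0])) (c, acc)).2 = acc ++ pvGo ni t c := by
  induction t generalizing c acc with
  | nil => simp [pvGo]
  | cons f rest ih =>
    simp only [List.foldl_cons, pvGo]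
    by_cases h : (f == 1) = true
    · rw [if_pos h, if_pos h, ih]; simp
    · rw [if_neg h, if_neg h, ih]; simp

theorem portA_eq_go (t ni : List Int) : splitseq_to_treeseq t ni = pvGo ni t 0 := by
  unfold splitseq_to_treeseq
  rw [PySem.List.foldl_pyRange_zero_pyGetD' t 0
    (fun (st : Int × List Int) f =>
        if f == 1 then (st.1 + 1, st.2 ++ [PySem.List.pyGetD ni st.1 0 + 1])
        else (st.1, st.2 ++ [0])) ((0 : Int), ([] : List Int))]
  simpa using portA_inv ni t 0 []

theorem cum_inv (t : List Int) (c : Int) (acc : List Int) :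
    (t.foldl (fun (st : Int × List Int) f =>
        (st.1 + (if f == 1 then 1 else 0), st.2 ++ [st.1 + (if f == 1 then 1 else 0)]))
      (c, acc)).2
    = acc ++ (List.range t.length).map
        (fun k => c + (((t.take (k + 1)).countP (fun f => f == 1) : Nat) : Int)) := by
  induction t generalizing c acc with
  | nil => simp
  | cons f rest ih =>
    simp only [List.foldl_cons, ih, List.length_cons, List.range_succ_eq_map]
    simp only [List.map_cons, List.map_map]
    rw [List.append_assoc]
    congr 1
    simp only [List.take_succ_cons, List.countP_cons, List.singleton_append]
    congr 1
    · split_ifs with h <;> simp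
    · apply List.map_congr_left
      intro k _
      simp only [Function.comp]
      split_ifs with h <;> push_cast [h] <;> ring

theorem cum_getD (t : List Int) (k : Nat) (hk : k < t.length) :
    (pvCumFlags t).getD k 0 = (((t.take (k + 1)).countP (fun f => f == 1) : Nat) : Int) := by
  unfold pvCumFlags
  rw [cum_inv t 0 []]
  simp [List.getD_eq_getElem?_getD, hk]

theorem portB_eq_go (t ni : List Int) : splitseq_to_treeseq_alt t ni = pvGo ni t 0 := by
  unfold splitseq_to_treeseq_alt
  apply List.ext_getElem
  · simp [pvGo_length, PySem.List.length_pyRange_one]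
  · intro k h1 h2
    have hk : k < t.length := by
      simpa [PySem.List.length_pyRange_one] using h1
    rw [List.getElem_map, PySem.List.getElem_pyRange_one]
    rw [pvGo_getElem ni t 0 k hk]
    have ht : PySem.List.pyGetD t ((0 : Int) + (k : Int)) 0 = t.getD k 0 := by
      simp [PySem.List.pyGetD_natCast]
    have htk : t.getD k 0 = t[k] := by simp [List.getD_eq_getElem?_getD, hk]
    rw [ht, htk]
    by_cases h : t[k] == 1
    · simp only [h, if_true]
      have hc : PySem.List.pyGetD (pvCumFlags t) ((0 : Int) + (k : Int)) 0
          = (pvCumFlags t).getD k 0 := by simp [PySem.List.pyGetD_natCast]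
      rw [hc, cum_getD t k hk]
      have hsplit : t.take (k + 1) = t.take k ++ [t[k]] := by
        rw [List.take_add_one]; simp [hk]
      have hcnt : (t.take (k + 1)).countP (fun f => f == 1)
          = (t.take k).countP (fun f => f == 1) + 1 := by
        rw [hsplit, List.countP_append]; simp [h]
      have hidx : (((t.take (k + 1)).countP (fun f => f == 1) : Nat) : Int) - 1
          = 0 + (((t.take k).countP (fun f => f == 1) : Nat) : Int) := by
        rw [hcnt]; push_cast; ring
      rw [hidx]
    · simp [h]

-- ===== VERDICT (by name: the statement is the Claim_ definition above) =====
theorem splitseq_to_treeseq_spec : Claim_equal_splitseq_to_treeseq := by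
  intro t ni _ _
  unfold Spec_splitseq_to_treeseq
  rw [portA_eq_go, portB_eq_go]
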